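-- pv_equiv track=rewrite | github.com/wuerzle/hass-jarolift | custom_components/jarolift/__init__.py | _encode_keeloq_bits
-- ===== SOURCE A (Python) =====
-- KEELOQ_BIT_ONE_LAST = "0c0005dc"
--
-- KEELOQ_BIT_ZERO_LAST = "190005dc"
--
-- KEELOQ_BIT_ONE = "0c19"
--
-- KEELOQ_BIT_ZERO = "190c"
--
-- def _encode_keeloq_bits(datastring: str) -> str:
--     """Encode a binary string into KeeLoq format.
--
--     Args:
--         datastring: Binary string to encode
--
--     Returns:
--         Hex-encoded string in KeeLoq format
--     """
--     codedstring = ""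
--     last_bit_index = len(datastring) - 1
--
--     for i, bit in enumerate(datastring):
--         is_last_bit = i == last_bit_index
--         is_one = bit == "1"
--
--         if is_last_bit:
--             codedstring += KEELOQ_BIT_ONE_LAST if is_one else KEELOQ_BIT_ZERO_LAST
--         else:
--             codedstring += KEELOQ_BIT_ONE if is_one else KEELOQ_BIT_ZERO
--
--     return codedstring
-- ===== SOURCE B (Python) =====
-- KEELOQ_BIT_ONE = "0c19"
-- KEELOQ_BIT_ZERO = "190c"
--
-- def _encode_keeloq_bits(datastring: str) -> str:
--     # Encode every bit uniformly, then rewrite the tail: the last-bit codes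
--     # ("0c0005dc"/"190005dc") are the uniform chunk's first two hex digits + "0005dc".
--     if not datastring:
--         return ""
--     full = "".join(KEELOQ_BIT_ONE if bit == "1" else KEELOQ_BIT_ZERO for bit in datastring)
--     return full[:-2] + "0005dc"
-- ===== Notes on version B (the rewrite author's own statement) =====
-- stated objective: alternative
-- what changed: B drops A's per-iteration is-last-index test entirely: it encodes every bit with its uniform 4-hex-digit chunk via str.join, then repairs the terminator by string surgery (slice off the last two hex digits and append the shared 6-digit tail), exploiting that each last-bit code equals the uniform chunk's first two hex digits plus that shared tail.
import Mathlib
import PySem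

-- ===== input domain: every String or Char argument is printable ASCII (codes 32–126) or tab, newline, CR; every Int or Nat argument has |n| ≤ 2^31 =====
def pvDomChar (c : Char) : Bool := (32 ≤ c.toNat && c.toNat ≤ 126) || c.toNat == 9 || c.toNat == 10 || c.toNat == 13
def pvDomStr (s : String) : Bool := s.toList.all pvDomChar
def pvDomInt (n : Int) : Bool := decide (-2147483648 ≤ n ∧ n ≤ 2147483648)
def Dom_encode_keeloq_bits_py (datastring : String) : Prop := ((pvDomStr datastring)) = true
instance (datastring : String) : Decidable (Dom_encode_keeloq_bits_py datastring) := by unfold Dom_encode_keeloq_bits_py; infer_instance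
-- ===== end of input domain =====

-- B drops A's last-bit test entirely: it encodes every bit uniformly and then rewrites the
-- tail by string surgery, full[:-2] + "0005dc"; objective: alternative (same cost, no per-bit branch on position).

-- ===== PORT A =====
-- for i, bit in enumerate(datastring): append a chunk chosen by (i == len-1, bit == "1")
def encode_keeloq_bits_py (datastring : String) : String :=
  (PySem.List.enumerate datastring.toList).foldl
    (fun codedstring p =>
      if p.1 = (datastring.toList.length : Int) - 1 then
        codedstring ++ (if p.2 = '1' then "0c0005dc" else "190005dc")
      else
        codedstring ++ (if p.2 = '1' then "0c19" else "190c"))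
    ""

-- ===== PORT B =====
-- if not datastring: return ""; full = uniform join over all bits; return full[:-2] + "0005dc"
def encBList (l : List Char) : String :=
  match l with
  | [] => ""
  | l@(_ :: _) =>
    let full := String.join (l.map (fun bit => if bit = '1' then "0c19" else "190c"))
    String.ofList (PySem.List.slice full.toList none (some (-2))) ++ "0005dc"

def encode_keeloq_bits_py_alt (datastring : String) : String :=
  encBList datastring.toList

-- ===== PRECONDITION & SPEC =====
def Spec_encode_keeloq_bits_py (datastring : String) (out : String) : Prop := out = encode_keeloq_bits_py_alt datastring
instance (datastring : String) (out : String) : Decidable (Spec_encode_keeloq_bits_py datastring out) := by unfold Spec_encode_keeloq_bits_py; infer_instance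

-- ===== CLAIM (what is proved, stated in full; the proofs are below) =====
def Claim_equal_encode_keeloq_bits_py : Prop := ∀ (datastring : String), Dom_encode_keeloq_bits_py datastring → Spec_encode_keeloq_bits_py datastring (encode_keeloq_bits_py datastring)

-- ===== LEMMAS AND PROOFS =====

-- String.foldl-append distributes over a prepended accumulator.
lemma foldl_append_init (l : List String) : ∀ (a x : String),
    List.foldl (fun r s => r ++ s) (a ++ x) l = a ++ List.foldl (fun r s => r ++ s) x l := by
  induction l with
  | nil => intro a x; simp
  | cons h t ih => intro a x; simp only [List.foldl_cons, String.append_assoc]; exact ih a (x ++ h)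

lemma join_cons (x : String) (xs : List String) :
    String.join (x :: xs) = x ++ String.join xs := by
  have := foldl_append_init xs x ""
  simpa [String.join] using this

-- The uniform encoding of a char list has 4 characters per input char.
lemma join_map_length (l : List Char) :
    (String.join (l.map (fun bit => if bit = '1' then "0c19" else "190c"))).toList.length
      = 4 * l.length := by
  induction l with
  | nil => simp [String.join]
  | cons x xs ih =>
    rw [List.map_cons, join_cons, String.toList_append, List.length_append, ih]
    have h1 : ("0c19" : String).toList.length = 4 := by decide
    have h0 : ("190c" : String).toList.length = 4 := by decide
    by_cases hx : x = '1' <;> simp only [hx, if_true, if_false, h1, h0, List.length_cons] <;> omega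

-- Core invariant: A's enumerate-foldl starting at index s on a nonempty list, with the
-- "last" index pinned at s + length - 1, produces acc ++ (uniform prefix) ++ (terminator).
lemma foldA_eq (l : List Char) (hl : l ≠ []) : ∀ (s : Int) (acc : String),
    (PySem.List.enumerate l s).foldl
      (fun codedstring p =>
        if p.1 = s + (l.length : Int) - 1 then
          codedstring ++ (if p.2 = '1' then "0c0005dc" else "190005dc")
        else
          codedstring ++ (if p.2 = '1' then "0c19" else "190c"))
      acc
    = acc ++ String.join (l.dropLast.map (fun bit => if bit = '1' then "0c19" else "190c"))
        ++ (if l.getLast? = some '1' then "0c0005dc" else "190005dc") := by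
  induction l with
  | nil => exact absurd rfl hl
  | cons b rest ih =>
    intro s acc
    rcases rest with _ | ⟨c, rest'⟩
    · simp [PySem.List.enumerate_cons, PySem.List.enumerate_nil, String.join]
    · have hne : (c :: rest') ≠ [] := by simp
      have hlast : ¬ (s = s + ((b :: c :: rest').length : Int) - 1) := by
        simp only [List.length_cons]; push_cast; omega
      have hshift : s + ((b :: c :: rest').length : Int) - 1
          = (s + 1) + ((c :: rest').length : Int) - 1 := by
        simp only [List.length_cons]; push_cast; ring
      rw [PySem.List.enumerate_cons, List.foldl_cons, if_neg hlast]
      simp only [hshift]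
      rw [ih hne (s + 1) (acc ++ (if b = '1' then "0c19" else "190c"))]
      simp [List.dropLast_cons₂, join_cons, List.getLast?_cons_cons, String.append_assoc]

-- B's tail surgery equals "prefix + terminator": dropping the last 2 chars of the uniform
-- encoding leaves the prefix chunks plus the first 2 chars of the last chunk.
lemma altB_surgery (xs : List Char) (b : Char) :
    String.ofList (PySem.List.slice
        (String.join ((xs ++ [b]).map (fun bit => if bit = '1' then "0c19" else "190c"))).toList
        none (some (-2))) ++ "0005dc"
    = String.join (xs.map (fun bit => if bit = '1' then "0c19" else "190c"))
        ++ (if b = '1' then "0c0005dc" else "190005dc") := by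
  induction xs with
  | nil =>
    by_cases hb : b = '1' <;> simp [hb, String.join, PySem.List.slice]
  | cons x xs ih =>
    rw [PySem.List.slice_to_neg_ofNat _ 2 (by omega)] at ih ⊢
    have hJlen := join_map_length (xs ++ [b])
    simp only [List.cons_append, List.map_cons, join_cons, String.toList_append,
      List.length_append, List.length_cons, List.length_nil] at *
    have hchunk : ((if x = '1' then "0c19" else "190c") : String).toList.length = 4 := by
      by_cases hx : x = '1' <;> simp [hx]
    rw [List.take_append]
    have h1 : ((if x = '1' then "0c19" else "190c") : String).toList.length +
        (String.join ((xs ++ [b]).map (fun bit => if bit = '1' then "0c19" else "190c"))).toList.length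
        - 2 ≥ ((if x = '1' then "0c19" else "190c") : String).toList.length := by
      simp only [hJlen, hchunk]; omega
    rw [List.take_of_length_le h1]
    have h2 : ((if x = '1' then "0c19" else "190c") : String).toList.length +
        (String.join ((xs ++ [b]).map (fun bit => if bit = '1' then "0c19" else "190c"))).toList.length
        - 2 - ((if x = '1' then "0c19" else "190c") : String).toList.length
        = (String.join ((xs ++ [b]).map (fun bit => if bit = '1' then "0c19" else "190c"))).toList.length - 2 := by
      omega
    rw [h2]
    simp only [String.ofList_append, String.ofList_toList, String.append_assoc, ih]

-- On a nonempty (concat-shaped) list, encBList is the slice-surgery expression.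
lemma encB_concat (xs : List Char) (y : Char) :
    encBList (xs ++ [y])
    = String.ofList (PySem.List.slice
        (String.join ((xs ++ [y]).map (fun bit => if bit = '1' then "0c19" else "190c"))).toList
        none (some (-2))) ++ "0005dc" := by
  cases xs with
  | nil => rfl
  | cons x xs' => rfl

-- ===== VERDICT (by name: the statement is the Claim_ definition above) =====
theorem encode_keeloq_bits_py_spec : Claim_equal_encode_keeloq_bits_py := by
  intro s _
  unfold Spec_encode_keeloq_bits_py encode_keeloq_bits_py encode_keeloq_bits_py_alt
  cases hl : s.toList with
  | nil => simp [PySem.List.enumerate_nil, encBList]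
  | cons b rest =>
    have h := foldA_eq (b :: rest) (by simp) 0 ""
    simp only [zero_add] at h
    rw [h]
    rcases List.eq_nil_or_concat (b :: rest) with hnil | ⟨xs, y, hconcat⟩
    · simp at hnil
    · rw [hconcat, List.concat_eq_append, encB_concat, altB_surgery]
      simp
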